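-- pv_equiv track=rewrite | github.com/AwesomeGRV/alert-intelligence-platform | backend/fastapi_app/services/correlation_service.py | _detect_escalation_pattern
-- ===== SOURCE A (Python) =====
-- from typing import Dict, Any, List, Optional
--
-- def _detect_escalation_pattern(sorted_alerts: List[Dict[str, Any]]) -> str:
--     """Detect escalation pattern in alerts"""
--     if len(sorted_alerts) < 2:
--         return "insufficient_data"
--
--     # Check if severity is increasing
--     severity_order = {"critical": 4, "high": 3, "medium": 2, "low": 1, "info": 0}
--
--     recent_alerts = sorted_alerts[:5]  # Check last 5 alerts
--     severity_trend = [severity_order.get(alert.get('severity', 'low'), 0) for alert in recent_alerts]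
--
--     if all(severity_trend[i] <= severity_trend[i+1] for i in range(len(severity_trend)-1)):
--         return "escalating"
--     elif all(severity_trend[i] >= severity_trend[i+1] for i in range(len(severity_trend)-1)):
--         return "de_escalating"
--     else:
--         return "fluctuating"
-- ===== SOURCE B (Python) =====
-- def _detect_escalation_pattern(sorted_alerts):
--     """Detect escalation pattern in alerts (sort-then-compare classification)"""
--     if len(sorted_alerts) < 2:
--         return "insufficient_data"
--
--     severity_order = {"critical": 4, "high": 3, "medium": 2, "low": 1, "info": 0}
--
--     recent_alerts = sorted_alerts[:5]
--     severity_trend = [severity_order.get(alert.get('severity', 'low'), 0) for alert in recent_alerts]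
--
--     if severity_trend == sorted(severity_trend):
--         return "escalating"
--     if severity_trend == sorted(severity_trend, reverse=True):
--         return "de_escalating"
--     return "fluctuating"
-- ===== Notes on version B (the rewrite author's own statement) =====
-- stated objective: idiomatic
-- what changed: The two pairwise adjacent-monotonicity generator scans are replaced by comparing the trend list against its sorted and reverse-sorted copies (sort-then-compare classification).
import Mathlib
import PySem

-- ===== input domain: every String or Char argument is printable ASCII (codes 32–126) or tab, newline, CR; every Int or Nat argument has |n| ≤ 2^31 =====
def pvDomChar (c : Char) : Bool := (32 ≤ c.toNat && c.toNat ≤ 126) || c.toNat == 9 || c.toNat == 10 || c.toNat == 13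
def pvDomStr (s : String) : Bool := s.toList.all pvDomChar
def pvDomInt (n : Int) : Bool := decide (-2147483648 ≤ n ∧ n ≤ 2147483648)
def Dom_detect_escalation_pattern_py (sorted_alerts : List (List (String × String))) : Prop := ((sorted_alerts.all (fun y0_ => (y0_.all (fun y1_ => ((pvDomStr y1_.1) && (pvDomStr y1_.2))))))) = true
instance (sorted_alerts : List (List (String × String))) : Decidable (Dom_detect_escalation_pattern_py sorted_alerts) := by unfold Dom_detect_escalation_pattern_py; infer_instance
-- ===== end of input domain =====

-- B replaces A's two pairwise adjacent-monotonicity scans with comparison of the trend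
-- list against its sorted / reverse-sorted copies (more idiomatic; same cost).

-- ===== PORT A =====
-- severity_order = {"critical": 4, "high": 3, "medium": 2, "low": 1, "info": 0}
def pvSevOrder : PySem.Dict String Int :=
  PySem.Dict.ofList [("critical", 4), ("high", 3), ("medium", 2), ("low", 1), ("info", 0)]

-- alert.get('severity', 'low') — alert is an association list (a Python dict): first match
def pvAlertSeverity (alert : List (String × String)) : String :=
  ((alert.find? (fun kv => kv.1 == "severity")).map Prod.snd).getD "low"

-- severity_trend = [severity_order.get(alert.get('severity','low'), 0) for alert in sorted_alerts[:5]]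
-- (this line is identical in A and in B, so it is a shared helper)
def pvSevTrend (sorted_alerts : List (List (String × String))) : List Int :=
  (PySem.List.slice sorted_alerts none (some 5)).map
    (fun alert => PySem.Dict.getD pvSevOrder (pvAlertSeverity alert) 0)

def detect_escalation_pattern_py (sorted_alerts : List (List (String × String))) : String :=
  if sorted_alerts.length < 2 then "insufficient_data"
  else
    let severity_trend := pvSevTrend sorted_alerts
    if (PySem.List.pyRange 0 ((severity_trend.length : Int) - 1) 1).all
        (fun i => decide (PySem.List.pyGetD severity_trend i 0 ≤ PySem.List.pyGetD severity_trend (i + 1) 0)) then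
      "escalating"
    else if (PySem.List.pyRange 0 ((severity_trend.length : Int) - 1) 1).all
        (fun i => decide (PySem.List.pyGetD severity_trend i 0 ≥ PySem.List.pyGetD severity_trend (i + 1) 0)) then
      "de_escalating"
    else
      "fluctuating"

-- ===== PORT B =====
def detect_escalation_pattern_py_alt (sorted_alerts : List (List (String × String))) : String :=
  if sorted_alerts.length < 2 then "insufficient_data"
  else
    let severity_trend := pvSevTrend sorted_alerts
    if severity_trend = PySem.List.sorted severity_trend (fun x => x) false then
      "escalating"
    else if severity_trend = PySem.List.sorted severity_trend (fun x => x) true then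
      "de_escalating"
    else
      "fluctuating"

-- ===== PRECONDITION & SPEC =====
def Spec_detect_escalation_pattern_py (sorted_alerts : List (List (String × String))) (out : String) : Prop := out = detect_escalation_pattern_py_alt sorted_alerts
instance (sorted_alerts : List (List (String × String))) (out : String) : Decidable (Spec_detect_escalation_pattern_py sorted_alerts out) := by unfold Spec_detect_escalation_pattern_py; infer_instance

-- ===== CLAIM (what is proved, stated in full; the proofs are below) =====
def Claim_equal_detect_escalation_pattern_py : Prop := ∀ (sorted_alerts : List (List (String × String))), Dom_detect_escalation_pattern_py sorted_alerts → Spec_detect_escalation_pattern_py sorted_alerts (detect_escalation_pattern_py sorted_alerts)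

-- ===== LEMMAS AND PROOFS =====

-- A's adjacent scan over range(len-1) says exactly: the list is an R-chain.
theorem pv_adjAll_iff (R : Int → Int → Prop) [DecidableRel R] (l : List Int) :
    ((PySem.List.pyRange 0 ((l.length : Int) - 1) 1).all
        (fun i => decide (R (PySem.List.pyGetD l i 0) (PySem.List.pyGetD l (i + 1) 0))) = true)
    ↔ l.IsChain R := by
  rw [List.all_eq_true, List.isChain_iff_getElem]
  constructor
  · intro h i hi
    have hm : (i : Int) ∈ PySem.List.pyRange 0 ((l.length : Int) - 1) 1 := by
      rw [PySem.List.mem_pyRange_one]; omega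
    have := h _ hm
    simp only [decide_eq_true_eq] at this
    have h1 : PySem.List.pyGetD l (i : Int) 0 = l[i] := by
      rw [PySem.List.pyGetD_natCast]
      simp [List.getD_eq_getElem?_getD, List.getElem?_eq_getElem (by omega : i < l.length)]
    have h2 : PySem.List.pyGetD l ((i : Int) + 1) 0 = l[i + 1] := by
      have he : ((i : Int) + 1) = ((i + 1 : Nat) : Int) := by push_cast; ring
      rw [he, PySem.List.pyGetD_natCast]
      simp [List.getD_eq_getElem?_getD, List.getElem?_eq_getElem hi]
    rwa [h1, h2] at this
  · intro h i hi
    rw [PySem.List.mem_pyRange_one] at hi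
    have hlt : i.toNat + 1 < l.length := by omega
    have := h i.toNat hlt
    simp only [decide_eq_true_eq]
    have h1 : PySem.List.pyGetD l i 0 = l[i.toNat] :=
      PySem.List.pyGetD_eq_getElem l (i := i) 0 (by omega) (by omega)
    have h2 : PySem.List.pyGetD l (i + 1) 0 = l[i.toNat + 1] := by
      rw [PySem.List.pyGetD_eq_getElem l (i := i + 1) 0 (by omega) (by omega)]
      have he : (i + 1).toNat = i.toNat + 1 := by omega
      simp only [he]
    rwa [h1, h2]

-- B's fixed-point tests say the same thing.
theorem pv_sorted_id_eq_iff (l : List Int) :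
    l = PySem.List.sorted l (fun x => x) false ↔ l.IsChain (· ≤ ·) := by
  haveI : Trans (α := Int) (· ≤ ·) (· ≤ ·) (· ≤ ·) := ⟨le_trans⟩
  rw [List.isChain_iff_pairwise]
  constructor
  · intro h
    have := PySem.List.sorted_pairwise l (fun x => x) (κ := Int)
    rw [← h] at this
    exact this
  · intro h
    exact (PySem.List.sorted_eq_self_of_pairwise l (fun x => x) h).symm

theorem pv_sorted_id_rev_eq_iff (l : List Int) :
    l = PySem.List.sorted l (fun x => x) true ↔ l.IsChain (fun a b => b ≤ a) := by
  haveI : Trans (α := Int) (fun a b : Int => b ≤ a) (fun a b : Int => b ≤ a) (fun a b : Int => b ≤ a) :=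
    ⟨fun h1 h2 => le_trans h2 h1⟩
  rw [List.isChain_iff_pairwise]
  constructor
  · intro h
    have := PySem.List.sorted_pairwise_rev l (fun x => x) (κ := Int)
    rw [← h] at this
    exact this
  · intro h
    exact (PySem.List.sorted_rev_eq_self_of_pairwise l (fun x => x) h).symm

-- The branch classification agrees on any trend list.
theorem pv_classify_eq (l : List Int) :
    (if (PySem.List.pyRange 0 ((l.length : Int) - 1) 1).all
        (fun i => decide (PySem.List.pyGetD l i 0 ≤ PySem.List.pyGetD l (i + 1) 0)) then
      "escalating"
    else if (PySem.List.pyRange 0 ((l.length : Int) - 1) 1).all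
        (fun i => decide (PySem.List.pyGetD l i 0 ≥ PySem.List.pyGetD l (i + 1) 0)) then
      "de_escalating"
    else
      "fluctuating")
    = (if l = PySem.List.sorted l (fun x => x) false then
      "escalating"
    else if l = PySem.List.sorted l (fun x => x) true then
      "de_escalating"
    else
      "fluctuating") := by
  have h1 := pv_adjAll_iff (· ≤ ·) l
  have h2 := pv_adjAll_iff (fun a b => a ≥ b) l
  have h3 := pv_sorted_id_eq_iff l
  have h4 := pv_sorted_id_rev_eq_iff l
  split_ifs <;> first | rfl | tauto

-- ===== VERDICT (by name: the statement is the Claim_ definition above) =====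
theorem detect_escalation_pattern_py_spec : Claim_equal_detect_escalation_pattern_py := by
  intro sorted_alerts _
  unfold Spec_detect_escalation_pattern_py detect_escalation_pattern_py detect_escalation_pattern_py_alt
  by_cases hlen : sorted_alerts.length < 2
  · rw [if_pos hlen, if_pos hlen]
  · rw [if_neg hlen, if_neg hlen]
    exact pv_classify_eq (pvSevTrend sorted_alerts)
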